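-- pv_equiv track=rewrite | github.com/jakeaminia/portfolioRepo | ParkourClubProjects/TreeHeight.py | get_heights
-- ===== SOURCE A (Python) =====
-- def get_all_prerequisites(node: str, matrix: dict) -> set:
--     result = set()
--     if not matrix.get(node):
--         return result
--     for prerequisite in matrix.get(node):
--         result.add(prerequisite)
--         for second_order_prerequisite in get_all_prerequisites(prerequisite, matrix):
--             result.add(second_order_prerequisite)
--     return result
--
-- def get_heights(matrix: dict):
--     node_heights_dict = dict()
--     sorted_nodes = list()
--     sorted_nodes_heights = list()
--     for node in matrix.keys():
--         node_heights_dict[node] = len(get_all_prerequisites(node, matrix))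
--     while node_heights_dict:
--         min_node = min(node_heights_dict, key=node_heights_dict.get)
--         min_node_height = node_heights_dict.pop(min_node)
--         sorted_nodes.append(min_node)
--         sorted_nodes_heights.append(min_node_height)
--     return sorted_nodes, sorted_nodes_heights
-- ===== SOURCE B (Python) =====
-- def get_heights(matrix: dict):
--     # Memoized DFS computes each node's transitive-prerequisite set once;
--     # one stable sort by count replaces A's repeated min-extraction.
--     memo = {}
--
--     def closure(node):
--         if node in memo:
--             return memo[node]
--         result = set()
--         for p in matrix.get(node) or ():
--             result.add(p)
--             result |= closure(p)
--         memo[node] = result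
--         return result
--
--     items = [(node, len(closure(node))) for node in matrix]
--     items.sort(key=lambda kv: kv[1])
--     return [n for n, _ in items], [h for _, h in items]
-- ===== Notes on version B (the rewrite author's own statement) =====
-- stated objective: faster
-- what changed: A recomputes each node's transitive-prerequisite set by unmemoized recursion (exponential on deep DAGs) and extracts the minimum from a dict n times (O(n^2)); B computes every closure once with a memoized DFS and orders the nodes with one stable sort by height; like A, B's recursion raises RecursionError on cyclic input (outside Pre_).
import Mathlib
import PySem

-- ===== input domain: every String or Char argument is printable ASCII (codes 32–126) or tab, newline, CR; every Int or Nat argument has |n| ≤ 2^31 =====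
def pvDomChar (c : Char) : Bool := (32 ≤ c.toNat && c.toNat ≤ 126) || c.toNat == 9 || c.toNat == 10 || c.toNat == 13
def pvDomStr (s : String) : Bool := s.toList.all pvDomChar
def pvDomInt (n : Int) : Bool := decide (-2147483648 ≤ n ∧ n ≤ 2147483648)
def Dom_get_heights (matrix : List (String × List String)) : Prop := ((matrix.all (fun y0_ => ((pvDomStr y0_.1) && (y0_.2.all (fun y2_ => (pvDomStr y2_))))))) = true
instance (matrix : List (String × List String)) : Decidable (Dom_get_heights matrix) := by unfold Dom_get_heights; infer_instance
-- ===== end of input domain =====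

-- B replaces A's unmemoized recursive closure computation with a memoized DFS (each node's
-- prerequisite set computed once) and A's repeated min-extraction loop with one stable sort;
-- equal return values on Pre_ (on cyclic inputs both Pythons raise RecursionError).

-- ===== PORT A =====
-- get_all_prerequisites(node, matrix): Python's recursion is unbounded; the port carries fuel.
-- On inputs satisfying Pre_ (acyclic graphs) every prerequisite chain visits distinct keys, so
-- the recursion depth is at most matrix.length + 1 and the fuelled port computes exactly
-- Python's value; on cyclic inputs Python raises RecursionError (excluded by Pre_).
def getAllPrerequisites (matrix : List (String × List String)) : Nat → String → PySem.Set String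
  | 0, _ => PySem.Set.empty
  | fuel+1, node =>
    -- 'if not matrix.get(node): return result' — None and [] are both falsy
    if ((PySem.Dict.mk matrix).get? node).getD [] = [] then PySem.Set.empty
    else (((PySem.Dict.mk matrix).get? node).getD []).foldl (fun result p =>
      -- result.add(prerequisite); for s in get_all_prerequisites(...): result.add(s)
      PySem.Set.update (PySem.Set.add result p) (getAllPrerequisites matrix fuel p))
      PySem.Set.empty

lemma erase_items_lt {d : PySem.Dict String Int} {m : String × Int}
    (hm : m ∈ d.items) : (d.erase m.1).items.length < d.items.length := by
  simp only [PySem.Dict.erase]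
  exact List.length_filter_lt_length_iff_exists.mpr ⟨m, hm, by simp⟩

-- the 'while node_heights_dict:' loop — min(d, key=d.get) is the first key of minimal value
-- (keys are unique), pop it, append the node and its height
def selLoop (d : PySem.Dict String Int) (nodes : List String) (heights : List Int) :
    List String × List Int :=
  match hm : PySem.List.min? d.items (fun kv => kv.2) with
  | none => (nodes, heights)
  | some m => selLoop (d.erase m.1) (nodes ++ [m.1]) (heights ++ [m.2])
  termination_by d.items.length
  decreasing_by exact erase_items_lt (PySem.List.min?_mem hm)

def get_heights (matrix : List (String × List String)) : List String × List Int :=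
  let hd := matrix.foldl
    (fun d kv => PySem.Dict.insert d kv.1
      ((getAllPrerequisites matrix (matrix.length + 1) kv.1).length : Int))
    PySem.Dict.empty
  selLoop hd [] []

-- ===== PORT B =====
-- matrix.get(node) or ()
def pvNeighbors (matrix : List (String × List String)) (node : String) : List String :=
  ((PySem.Dict.mk matrix).get? node).getD []

-- the body's 'for p in matrix.get(node) or (): result.add(p); result |= closure(p)';
-- 'step' is the recursive call at the current depth, threading the memo dict
def closureFold (step : PySem.Dict String (PySem.Set String) → String →
      PySem.Set String × PySem.Dict String (PySem.Set String)) :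
    PySem.Set String → PySem.Dict String (PySem.Set String) → List String →
      PySem.Set String × PySem.Dict String (PySem.Set String)
  | s, memo, [] => (s, memo)
  | s, memo, p :: ps =>
    let r := step memo p
    closureFold step (PySem.Set.update (PySem.Set.add s p) r.1) r.2 ps

-- closure(node) with memo threaded through; Python's recursion is unbounded, the port carries
-- fuel (under Pre_ the memoized DFS depth is at most matrix.length + 1, so fuel never runs out;
-- on cyclic inputs Python raises RecursionError, excluded by Pre_)
def closureB (matrix : List (String × List String)) :
    Nat → PySem.Dict String (PySem.Set String) → String →
      PySem.Set String × PySem.Dict String (PySem.Set String)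
  | 0, memo, _ => (PySem.Set.empty, memo)
  | fuel+1, memo, node =>
    match memo.get? node with
    | some s => (s, memo)                       -- 'if node in memo: return memo[node]'
    | none =>
      let r := closureFold (closureB matrix fuel) PySem.Set.empty memo
        (pvNeighbors matrix node)
      (r.1, r.2.insert node r.1)                -- 'memo[node] = result; return result'

def get_heights_alt (matrix : List (String × List String)) : List String × List Int :=
  -- items = [(node, len(closure(node))) for node in matrix]
  let r := matrix.foldl
    (fun acc kv =>
      let c := closureB matrix (matrix.length + 1) acc.2 kv.1
      (acc.1 ++ [(kv.1, (c.1.length : Int))], c.2))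
    (([] : List (String × Int)), (PySem.Dict.empty : PySem.Dict String (PySem.Set String)))
  -- items.sort(key=lambda kv: kv[1]) — stable
  let s := PySem.List.sorted r.1 (fun kv => kv.2) false
  (s.map Prod.fst, s.map Prod.snd)

-- ===== PRECONDITION & SPEC =====
-- Kahn-style peeling: the prerequisite graph is acyclic iff all keys can be removed, repeatedly
-- taking the keys none of whose prerequisites is still pending (a graph property of the input,
-- not either port's algorithm)
-- the keys whose every prerequisite is already resolved (i.e. no longer pending)
def pvReady (m : PySem.Dict String (List String)) (pending : List String) : List String :=
  pending.filter (fun a => ((m.get? a).getD []).all (fun b => !pending.contains b))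

def pvPeel (m : PySem.Dict String (List String)) : Nat → List String → Bool
  | 0, pending => pending.isEmpty
  | rounds+1, pending =>
    if pending.isEmpty then true
    else if (pvReady m pending).isEmpty then false
    else pvPeel m rounds (pending.filter (fun a => !(pvReady m pending).contains a))

def pvAcyclic (matrix : List (String × List String)) : Bool :=
  pvPeel (PySem.Dict.ofList matrix) (PySem.Dict.ofList matrix).keys.length
    (PySem.Dict.ofList matrix).keys

-- Pre_ excludes (1) cyclic prerequisite graphs, on which both Pythons raise RecursionError, and
-- (2) lists with duplicate keys, which a Python dict cannot represent (the assoc-list ports'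
-- first-match lookup would diverge from Python's last-wins dict construction).
def Pre_get_heights (matrix : List (String × List String)) : Prop :=
  (matrix.map Prod.fst).Nodup ∧ pvAcyclic matrix = true
instance (matrix : List (String × List String)) : Decidable (Pre_get_heights matrix) := by
  unfold Pre_get_heights; infer_instance

def pvWitness_get_heights : (List (String × List String)) :=
  [("b", ["a"]), ("a", []), ("c", ["b", "a"])]

def Spec_get_heights (matrix : List (String × List String)) (out : List String × List Int) : Prop :=
  out = get_heights_alt matrix
instance (matrix : List (String × List String)) (out : List String × List Int) :
    Decidable (Spec_get_heights matrix out) := by unfold Spec_get_heights; infer_instance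

-- ===== CLAIM (what is proved, stated in full; the proofs are below) =====
def Claim_equal_get_heights : Prop := ∀ (matrix : List (String × List String)),
  Dom_get_heights matrix → Pre_get_heights matrix →
    Spec_get_heights matrix (get_heights matrix)

-- ===== LEMMAS AND PROOFS =====

-- reachability in 1..f steps along the prerequisite edges (first-match lookup, as both ports use)
def pvRW (matrix : List (String × List String)) : Nat → String → String → Prop
  | 0, _, _ => False
  | f+1, a, b => ∃ p ∈ pvNeighbors matrix a, b = p ∨ pvRW matrix f p b

-- reachability (transitive closure): what B's memoized sets hold
def pvReach (matrix : List (String × List String)) (a b : String) : Prop :=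
  ∃ f, pvRW matrix f a b

theorem pvRW_mono (matrix : List (String × List String)) :
    ∀ (f g : Nat) (a b : String), f ≤ g → pvRW matrix f a b → pvRW matrix g a b := by
  have aux : ∀ (f : Nat) (a b : String), pvRW matrix f a b → pvRW matrix (f+1) a b := by
    intro f
    induction f with
    | zero => intro a b h; simp [pvRW] at h
    | succ f ih =>
      rintro a b ⟨p, hp, h⟩
      exact ⟨p, hp, h.imp id (ih p b)⟩
  intro f g a b hle
  induction hle with
  | refl => exact id
  | step _ ih => exact fun h => aux _ _ _ (ih h)

theorem pvReach_iff (matrix : List (String × List String)) (a b : String) :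
    pvReach matrix a b ↔ ∃ p ∈ pvNeighbors matrix a, b = p ∨ pvReach matrix p b := by
  constructor
  · rintro ⟨f, hf⟩
    cases f with
    | zero => simp [pvRW] at hf
    | succ g =>
      obtain ⟨p, hp, hb⟩ := hf
      exact ⟨p, hp, hb.imp id (fun h => ⟨g, h⟩)⟩
  · rintro ⟨p, hp, hb | ⟨g, hg⟩⟩
    · exact ⟨1, p, hp, Or.inl hb⟩
    · exact ⟨g + 1, p, hp, Or.inr hg⟩

-- all prerequisite chains from a have length ≤ j
def pvBnd (matrix : List (String × List String)) : Nat → String → Prop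
  | 0, a => pvNeighbors matrix a = []
  | j+1, a => ∀ p ∈ pvNeighbors matrix a, pvBnd matrix j p

theorem pvBnd_succ (matrix : List (String × List String)) :
    ∀ (j : Nat) (a : String), pvBnd matrix j a → pvBnd matrix (j+1) a := by
  intro j
  induction j with
  | zero => intro a h p hp; rw [h] at hp; cases hp
  | succ j ih => intro a h p hp; exact ih p (h p hp)

theorem pvBnd_mono (matrix : List (String × List String)) {i j : Nat} (hij : i ≤ j)
    (a : String) (h : pvBnd matrix i a) : pvBnd matrix j a := by
  induction hij with
  | refl => exact h
  | step _ ih => exact pvBnd_succ matrix _ a ih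

-- successful Kahn peeling bounds every chain: each peeled round only removes keys whose
-- prerequisites were removed earlier (or are not keys at all)
theorem peel_bnd (matrix : List (String × List String)) :
    ∀ (r : Nat) (pending : List String) (i : Nat),
      pvPeel (PySem.Dict.mk matrix) r pending = true →
      (∀ a, a ∉ pending → pvBnd matrix i a) →
      ∀ a, pvBnd matrix (i + r) a := by
  intro r
  induction r with
  | zero =>
    intro pending i hp hbase a
    rw [pvPeel] at hp
    exact hbase a (by simp [List.isEmpty_iff.mp hp])
  | succ r ih =>
    intro pending i hp hbase a
    rw [pvPeel] at hp
    by_cases hemp : pending.isEmpty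
    · exact pvBnd_mono matrix (Nat.le_add_right i (r+1)) a
        (hbase a (by simp [List.isEmpty_iff.mp hemp]))
    rw [if_neg hemp] at hp
    by_cases hrdy : (pvReady (PySem.Dict.mk matrix) pending).isEmpty
    · rw [if_pos hrdy] at hp; cases hp
    · rw [if_neg hrdy] at hp
      have hstep : ∀ a, a ∉ pending.filter (fun a => !(pvReady (PySem.Dict.mk matrix) pending).contains a) →
          pvBnd matrix (i+1) a := by
        intro a ha
        by_cases hpend : a ∈ pending
        · have hready : a ∈ pvReady (PySem.Dict.mk matrix) pending := by
            by_contra hnr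
            exact ha (List.mem_filter.mpr ⟨hpend, by simpa using hnr⟩)
          have := (List.mem_filter.mp hready).2
          intro p hp
          have hnotpend : p ∉ pending := by
            have hall := List.all_eq_true.mp this p hp
            simpa using hall
          exact hbase p hnotpend
        · exact pvBnd_succ matrix i a (hbase a hpend)
      have := ih _ (i+1) hp hstep a
      rwa [Nat.add_assoc, Nat.add_comm 1 r] at this
  
-- under unique keys the dict built by Python equals the literal association list
theorem ofList_eq_mk (matrix : List (String × List String))
    (hnd : (matrix.map Prod.fst).Nodup) :
    PySem.Dict.ofList matrix = PySem.Dict.mk matrix := by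
  apply PySem.Dict.ext
  have : PySem.Dict.ofList matrix =
      matrix.foldl (fun d kv => d.insert kv.1 kv.2) PySem.Dict.empty := rfl
  rw [this]
  have h := PySem.Dict.items_foldl_insert_fresh (l := matrix) (k := Prod.fst)
    (v := Prod.snd) (d := PySem.Dict.empty) (fun a _ => by simp [pysem]) hnd
  simpa using h

-- on an acyclic input every chain has length at most the number of keys
theorem bnd_all (matrix : List (String × List String))
    (hnd : (matrix.map Prod.fst).Nodup) (hac : pvAcyclic matrix = true) :
    ∀ a, pvBnd matrix matrix.length a := by
  unfold pvAcyclic at hac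
  rw [ofList_eq_mk matrix hnd] at hac
  have hkeys : (PySem.Dict.mk matrix).keys = matrix.map Prod.fst := by simp [pysem]
  have hlen : (PySem.Dict.mk matrix).keys.length = matrix.length := by
    rw [hkeys]; simp
  rw [hlen] at hac
  have hbase : ∀ a, a ∉ (PySem.Dict.mk matrix).keys → pvBnd matrix 0 a := by
    intro a ha
    show pvNeighbors matrix a = []
    unfold pvNeighbors
    rw [(PySem.Dict.get?_eq_none_iff_not_mem_keys _ a).mpr ha]
    rfl
  have := peel_bnd matrix matrix.length (PySem.Dict.mk matrix).keys 0 hac hbase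
  simpa using this

-- bounded chains saturate reachability: any pvRW-path collapses below the chain bound
theorem bnd_sat (matrix : List (String × List String)) :
    ∀ (j : Nat) (a : String), pvBnd matrix j a →
      ∀ (f : Nat) (b : String), pvRW matrix f a b → pvRW matrix j a b := by
  intro j
  induction j with
  | zero =>
    intro a h f b hf
    cases f with
    | zero => exact hf.elim
    | succ g => obtain ⟨p, hp, _⟩ := hf; rw [h] at hp; cases hp
  | succ j ih =>
    intro a h f b hf
    cases f with
    | zero => exact hf.elim
    | succ g =>
      obtain ⟨p, hp, hb⟩ := hf
      exact ⟨p, hp, hb.imp id (fun hr => ih p (h p hp) g b hr)⟩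

theorem reach_iff_rw (matrix : List (String × List String))
    (hbnd : ∀ a, pvBnd matrix matrix.length a) (a b : String) :
    pvReach matrix a b ↔ pvRW matrix (matrix.length + 1) a b := by
  constructor
  · rintro ⟨f, hf⟩
    exact pvRW_mono matrix matrix.length (matrix.length + 1) a b (Nat.le_succ _)
      (bnd_sat matrix matrix.length a (hbnd a) f b hf)
  · exact fun h => ⟨matrix.length + 1, h⟩

-- A's inner double loop: membership in the fold, and no duplicates
theorem mem_foldA (matrix : List (String × List String)) (fuel : Nat) :
    ∀ (ps : List String) (init : PySem.Set String) (b : String),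
      (b ∈ ps.foldl (fun r p =>
          PySem.Set.update (PySem.Set.add r p) (getAllPrerequisites matrix fuel p)) init ↔
        b ∈ init ∨ ∃ p ∈ ps, b = p ∨ b ∈ getAllPrerequisites matrix fuel p) := by
  intro ps
  induction ps with
  | nil => simp
  | cons q t ih =>
    intro init b
    rw [List.foldl_cons, ih]
    simp [PySem.Set.mem_update, PySem.Set.mem_add, or_assoc]

theorem nodup_foldA (matrix : List (String × List String)) (fuel : Nat) :
    ∀ (ps : List String) (init : PySem.Set String), init.Nodup →
      (ps.foldl (fun r p =>
          PySem.Set.update (PySem.Set.add r p) (getAllPrerequisites matrix fuel p)) init).Nodup := by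
  intro ps
  induction ps with
  | nil => exact fun init h => h
  | cons q t ih =>
    intro init h
    exact ih _ (PySem.Set.nodup_update _ _ (PySem.Set.nodup_add _ _ h))

theorem mem_gapA (matrix : List (String × List String)) :
    ∀ (fuel : Nat) (node b : String),
      b ∈ getAllPrerequisites matrix fuel node ↔ pvRW matrix fuel node b := by
  intro fuel
  induction fuel with
  | zero => intro node b; simp [getAllPrerequisites, PySem.Set.empty, pvRW]
  | succ fuel ih =>
    intro node b
    rw [getAllPrerequisites]
    split_ifs with hps
    · simp [PySem.Set.empty, pvRW, pvNeighbors, hps]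
    · rw [mem_foldA]
      simp only [PySem.Set.empty, List.not_mem_nil, false_or]
      show (∃ p ∈ ((PySem.Dict.mk matrix).get? node).getD [], b = p ∨ _) ↔ _
      constructor
      · rintro ⟨p, hp, hb⟩
        exact ⟨p, hp, hb.imp id (fun h => (ih p b).mp h)⟩
      · rintro ⟨p, hp, hb⟩
        exact ⟨p, hp, hb.imp id (fun h => (ih p b).mpr h)⟩

theorem nodup_gapA (matrix : List (String × List String)) (fuel : Nat) (node : String) :
    (getAllPrerequisites matrix fuel node).Nodup := by
  cases fuel with
  | zero => simp [getAllPrerequisites, PySem.Set.empty]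
  | succ fuel =>
    rw [getAllPrerequisites]
    split_ifs with hps
    · simp [PySem.Set.empty]
    · exact nodup_foldA matrix fuel _ _ (by simp [PySem.Set.empty])

-- every memo entry is the full prerequisite closure of its key, duplicate-free
def GoodMemo (matrix : List (String × List String))
    (memo : PySem.Dict String (PySem.Set String)) : Prop :=
  memo.keys.Nodup ∧
  ∀ kv ∈ memo.items, kv.2.Nodup ∧ ∀ b, (b ∈ kv.2 ↔ pvReach matrix kv.1 b)

theorem closureFold_correct (matrix : List (String × List String)) (f : Nat)
    (IH : ∀ (memo : PySem.Dict String (PySem.Set String)) (node : String),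
      (∃ j, j < f ∧ pvBnd matrix j node) → GoodMemo matrix memo →
        GoodMemo matrix (closureB matrix f memo node).2 ∧
        (closureB matrix f memo node).1.Nodup ∧
        (∀ b, b ∈ (closureB matrix f memo node).1 ↔ pvReach matrix node b)) :
    ∀ (ps : List String), (∀ p ∈ ps, ∃ j, j < f ∧ pvBnd matrix j p) →
      ∀ (s : PySem.Set String) (memo : PySem.Dict String (PySem.Set String)),
        s.Nodup → GoodMemo matrix memo →
        GoodMemo matrix (closureFold (closureB matrix f) s memo ps).2 ∧
        (closureFold (closureB matrix f) s memo ps).1.Nodup ∧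
        (∀ b, b ∈ (closureFold (closureB matrix f) s memo ps).1 ↔
          b ∈ s ∨ ∃ p ∈ ps, b = p ∨ pvReach matrix p b) := by
  intro ps
  induction ps with
  | nil =>
    intro _ s memo hs hg
    exact ⟨hg, hs, by simp [closureFold]⟩
  | cons q t iht =>
    intro hps s memo hs hg
    obtain ⟨hg', hnd', hmem'⟩ := IH memo q (hps q (List.mem_cons_self)) hg
    rw [closureFold]
    obtain ⟨rg, rnd, rmem⟩ := iht (fun p hp => hps p (List.mem_cons_of_mem q hp))
      (PySem.Set.update (PySem.Set.add s q) (closureB matrix f memo q).1)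
      (closureB matrix f memo q).2
      (PySem.Set.nodup_update _ _ (PySem.Set.nodup_add _ _ hs)) hg'
    refine ⟨rg, rnd, fun b => ?_⟩
    rw [rmem b, PySem.Set.mem_update, PySem.Set.mem_add, hmem' b]
    constructor
    · rintro (((hb | hb) | hb) | ⟨p, hp, hb⟩)
      · exact Or.inl hb
      · exact Or.inr ⟨q, List.mem_cons_self, Or.inl hb⟩
      · exact Or.inr ⟨q, List.mem_cons_self, Or.inr hb⟩
      · exact Or.inr ⟨p, List.mem_cons_of_mem q hp, hb⟩
    · rintro (hb | ⟨p, hp, hb⟩)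
      · exact Or.inl (Or.inl (Or.inl hb))
      · rcases List.mem_cons.mp hp with rfl | hp'
        · rcases hb with rfl | hb
          · exact Or.inl (Or.inl (Or.inr rfl))
          · exact Or.inl (Or.inr hb)
        · exact Or.inr ⟨p, hp', hb⟩

theorem closureB_correct (matrix : List (String × List String)) :
    ∀ (f : Nat) (memo : PySem.Dict String (PySem.Set String)) (node : String),
      (∃ j, j < f ∧ pvBnd matrix j node) → GoodMemo matrix memo →
        GoodMemo matrix (closureB matrix f memo node).2 ∧
        (closureB matrix f memo node).1.Nodup ∧
        (∀ b, b ∈ (closureB matrix f memo node).1 ↔ pvReach matrix node b) := by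
  intro f
  induction f with
  | zero => rintro memo node ⟨j, hj, _⟩ _; omega
  | succ f ihf =>
    intro memo node hbnd hg
    rw [closureB]
    rcases hget : memo.get? node with _ | s
    · simp only
      obtain ⟨j, hj, hbj⟩ := hbnd
      have hnbrs : ∀ p ∈ pvNeighbors matrix node, ∃ j', j' < f ∧ pvBnd matrix j' p := by
        intro p hp
        cases j with
        | zero => rw [hbj] at hp; cases hp
        | succ j' => exact ⟨j', by omega, hbj p hp⟩
      obtain ⟨rg, rnd, rmem⟩ := closureFold_correct matrix f ihf
        (pvNeighbors matrix node) hnbrs PySem.Set.empty memo (by simp [PySem.Set.empty]) hg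
      have hchar : ∀ b, b ∈ (closureFold (closureB matrix f) PySem.Set.empty memo
          (pvNeighbors matrix node)).1 ↔ pvReach matrix node b := by
        intro b
        rw [rmem b, pvReach_iff matrix node b]
        simp [PySem.Set.empty]
      refine ⟨⟨?_, ?_⟩, rnd, hchar⟩
      · -- keys stay unique through the insert
        rcases (PySem.Dict.contains_iff_mem_keys
            (d := (closureFold (closureB matrix f) PySem.Set.empty memo
              (pvNeighbors matrix node)).2) (k := node)) with hiff
        by_cases hc : (closureFold (closureB matrix f) PySem.Set.empty memo
            (pvNeighbors matrix node)).2.contains node = true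
        · rw [PySem.Dict.keys_insert_of_contains _ _ hc]; exact rg.1
        · rw [PySem.Dict.keys_insert_of_not_contains _ _ (by simpa using hc)]
          refine List.Nodup.append rg.1 (by simp) ?_
          intro a ha hb
          simp only [List.mem_singleton] at hb
          subst hb
          exact hc (hiff.mpr ha)
      · intro kv hkv
        rcases (PySem.Dict.mem_items_insert _ _ _ _).mp hkv with rfl | ⟨hkv', _⟩
        · exact ⟨rnd, hchar⟩
        · exact rg.2 kv hkv'
    · exact ⟨hg, (hg.2 (node, s) (PySem.Dict.mem_items_of_get?_eq_some _ hget)).1,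
        fun b => (hg.2 (node, s) (PySem.Dict.mem_items_of_get?_eq_some _ hget)).2 b⟩

-- B's item loop produces exactly A's (node, height) pairs, in key order
theorem itemsB_correct (matrix : List (String × List String))
    (hbnd : ∀ a, pvBnd matrix matrix.length a) :
    ∀ (l : List (String × List String)) (acc : List (String × Int))
      (memo : PySem.Dict String (PySem.Set String)), GoodMemo matrix memo →
      (l.foldl (fun acc kv =>
          let c := closureB matrix (matrix.length + 1) acc.2 kv.1
          (acc.1 ++ [(kv.1, (c.1.length : Int))], c.2)) (acc, memo)).1 =
        acc ++ l.map (fun kv =>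
          (kv.1, ((getAllPrerequisites matrix (matrix.length + 1) kv.1).length : Int))) := by
  intro l
  induction l with
  | nil => intro acc memo _; simp
  | cons kv t iht =>
    intro acc memo hg
    obtain ⟨hg', hnd', hmem'⟩ := closureB_correct matrix (matrix.length + 1) memo kv.1
      ⟨matrix.length, Nat.lt_succ_self _, hbnd kv.1⟩ hg
    have hlen : ((closureB matrix (matrix.length + 1) memo kv.1).1.length : Int) =
        ((getAllPrerequisites matrix (matrix.length + 1) kv.1).length : Int) := by
      have hperm : (closureB matrix (matrix.length + 1) memo kv.1).1.Perm
          (getAllPrerequisites matrix (matrix.length + 1) kv.1) := by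
        rw [List.perm_ext_iff_of_nodup hnd' (nodup_gapA matrix _ kv.1)]
        intro b
        rw [hmem' b, mem_gapA, reach_iff_rw matrix hbnd]
      exact_mod_cast hperm.length_eq
    rw [List.foldl_cons]
    simp only
    rw [iht _ _ hg', hlen]
    simp

-- repeatedly extracting the first minimum is the stable sort
theorem min?_append_singleton (l : List (String × Int)) (a : String × Int) :
    PySem.List.min? (l ++ [a]) (fun kv => kv.2) =
      match PySem.List.min? l (fun kv => kv.2) with
      | none => some a
      | some m => if a.2 < m.2 then some a else some m := by
  rcases hl : PySem.List.min? l (fun kv => kv.2) with _ | m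
  · have : l = [] := (PySem.List.min?_eq_none_iff l _).mp hl
    subst this
    rfl
  · unfold PySem.List.min? at hl ⊢
    rw [List.foldl_append, hl]
    rfl

theorem sorted_append_singleton (l : List (String × Int)) (a : String × Int) :
    PySem.List.sorted (l ++ [a]) (fun kv => kv.2) false =
      PySem.List.insertBy (fun x y => decide (x.2 < y.2)) a
        (PySem.List.sorted l (fun kv => kv.2) false) := by
  rw [PySem.List.sorted_eq_foldl_insertBy, PySem.List.sorted_eq_foldl_insertBy,
    List.foldl_append]
  rfl

theorem sel_sorted :
    ∀ (l : List (String × Int)) (m : String × Int),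
      PySem.List.min? l (fun kv => kv.2) = some m →
      PySem.List.sorted l (fun kv => kv.2) false =
        m :: PySem.List.sorted (l.erase m) (fun kv => kv.2) false := by
  intro l
  induction l using List.reverseRecOn with
  | nil => intro m hm; simp [PySem.List.min?] at hm
  | append_singleton l a ih =>
    intro m hm
    rw [min?_append_singleton] at hm
    rcases hl : PySem.List.min? l (fun kv => kv.2) with _ | m'
    · have : l = [] := (PySem.List.min?_eq_none_iff l _).mp hl
      subst this
      rw [hl] at hm
      simp only at hm
      cases hm
      simp [PySem.List.sorted, PySem.List.insertBy]
    · rw [hl] at hm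
      simp only at hm
      by_cases hlt : a.2 < m'.2
      · rw [if_pos hlt] at hm
        cases hm
        -- the new last element is the strict minimum: it goes to the front
        have hnotin : a ∉ l := by
          intro hmem
          exact absurd (PySem.List.min?_isMin hl a hmem) (by omega)
        rw [List.erase_append_right [a] hnotin]
        rw [List.erase_cons_head, List.append_nil, sorted_append_singleton]
        rcases hsl : PySem.List.sorted l (fun kv => kv.2) false with _ | ⟨h0, t0⟩
        · simp [PySem.List.insertBy]
        · have hh0 : h0 ∈ l := by
            have := PySem.List.mem_sorted (xs := l) (key := fun kv : String × Int => kv.2)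
              (rev := false) (x := h0)
            rw [hsl] at this
            exact this.mp List.mem_cons_self
          have : m'.2 ≤ h0.2 := PySem.List.min?_isMin hl h0 hh0
          rw [PySem.List.insertBy]
          simp only [decide_eq_true_eq]
          rw [if_pos (by omega)]
      · rw [if_neg hlt] at hm
        cases hm
        -- the minimum of l stays the head; insert the new element into the tail
        have hmem : m ∈ l := PySem.List.min?_mem hl
        rw [List.erase_append_left [a] hmem, sorted_append_singleton, ih m hl,
          sorted_append_singleton]
        rw [PySem.List.insertBy]
        simp only [decide_eq_true_eq]
        rw [if_neg (by omega)]

-- with unique keys, popping key m.1 from the dict erases exactly the pair m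
theorem filter_ne_eq_erase :
    ∀ (l : List (String × Int)) (m : String × Int),
      (l.map Prod.fst).Nodup → m ∈ l →
      l.filter (fun p => !(p.1 == m.1)) = l.erase m := by
  intro l
  induction l with
  | nil => intro m _ hm; simp at hm
  | cons x t ih =>
    intro m hnd hm
    rw [List.map_cons, List.nodup_cons] at hnd
    obtain ⟨hx, ht⟩ := hnd
    by_cases hxm : x.1 = m.1
    · have hmx : m = x := by
        rcases List.mem_cons.mp hm with h | h
        · exact h
        · exact absurd (hxm ▸ List.mem_map_of_mem (f := Prod.fst) h) hx
      subst hmx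
      rw [List.erase_cons_head]
      rw [List.filter_cons_of_neg (by simp)]
      apply List.filter_eq_self.mpr
      intro p hp
      simp only [Bool.not_eq_eq_eq_not, Bool.not_true, beq_eq_false_iff_ne, ne_eq]
      intro h
      exact hx (h ▸ List.mem_map_of_mem (f := Prod.fst) hp)
    · have hmt : m ∈ t := by
        rcases List.mem_cons.mp hm with h | h
        · exact absurd (congrArg Prod.fst h.symm) hxm
        · exact h
      have hxm' : x ≠ m := fun h => hxm (congrArg Prod.fst h)
      rw [List.filter_cons_of_pos (by simpa using hxm), List.erase_cons_tail (by simpa using hxm'),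
        ih m ht hmt]

theorem erase_dict_eq_erase {d : PySem.Dict String Int} {m : String × Int}
    (hnd : (d.items.map Prod.fst).Nodup) (hm : m ∈ d.items) :
    (d.erase m.1).items = d.items.erase m := by
  simp only [PySem.Dict.erase]
  exact filter_ne_eq_erase d.items m hnd hm

theorem selLoop_eq_sorted :
    ∀ (n : Nat) (d : PySem.Dict String Int), d.items.length ≤ n →
      (d.items.map Prod.fst).Nodup →
      ∀ (ns : List String) (hs : List Int),
        selLoop d ns hs =
          (ns ++ (PySem.List.sorted d.items (fun kv => kv.2) false).map Prod.fst,
           hs ++ (PySem.List.sorted d.items (fun kv => kv.2) false).map Prod.snd) := by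
  intro n
  induction n with
  | zero =>
    intro d hlen _ ns hs
    have hnil : d.items = [] := List.eq_nil_of_length_eq_zero (Nat.le_zero.mp hlen)
    rw [selLoop]
    rw [hnil]
    simp [PySem.List.min?, PySem.List.sorted]
  | succ n ih =>
    intro d hlen hnd ns hs
    rw [selLoop]
    split
    next hm =>
      have hnil : d.items = [] := (PySem.List.min?_eq_none_iff _ _).mp hm
      rw [hnil]
      simp [PySem.List.sorted]
    next m hm =>
      have hmem : m ∈ d.items := PySem.List.min?_mem hm
      have herase : (d.erase m.1).items = d.items.erase m := erase_dict_eq_erase hnd hmem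
      have hsub : List.Sublist (d.items.erase m) d.items := List.erase_sublist ..
      have hlen' : (d.erase m.1).items.length ≤ n := by
        have := erase_items_lt (d := d) hmem
        omega
      have hnd' : ((d.erase m.1).items.map Prod.fst).Nodup := by
        rw [herase]
        exact hnd.sublist (hsub.map Prod.fst)
      rw [ih (d.erase m.1) hlen' hnd' (ns ++ [m.1]) (hs ++ [m.2])]
      rw [herase, sel_sorted d.items m hm]
      simp

-- ===== VERDICT (by name: the statement is the Claim_ definition above) =====
theorem get_heights_spec : Claim_equal_get_heights := by
  unfold Claim_equal_get_heights
  intro matrix _ hpre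
  obtain ⟨hnd, hac⟩ := hpre
  unfold Spec_get_heights get_heights
  have hbnd : ∀ a, pvBnd matrix matrix.length a := bnd_all matrix hnd hac
  have hitems : (matrix.foldl
      (fun d kv => PySem.Dict.insert d kv.1
        ((getAllPrerequisites matrix (matrix.length + 1) kv.1).length : Int))
      PySem.Dict.empty).items =
      matrix.map (fun kv =>
        (kv.1, ((getAllPrerequisites matrix (matrix.length + 1) kv.1).length : Int))) := by
    have := PySem.Dict.items_foldl_insert_fresh (l := matrix) (k := Prod.fst)
      (v := fun kv => ((getAllPrerequisites matrix (matrix.length + 1) kv.1).length : Int))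
      (d := PySem.Dict.empty) (fun a _ => by simp [pysem]) hnd
    simpa using this
  have hnd' : (((matrix.foldl
      (fun d kv => PySem.Dict.insert d kv.1
        ((getAllPrerequisites matrix (matrix.length + 1) kv.1).length : Int))
      PySem.Dict.empty).items).map Prod.fst).Nodup := by
    rw [hitems, List.map_map]
    simpa using hnd
  rw [selLoop_eq_sorted _ _ le_rfl hnd' [] []]
  rw [hitems]
  have hB := itemsB_correct matrix hbnd matrix [] PySem.Dict.empty
    ⟨by simp [pysem], by intro kv hkv; simp [PySem.Dict.empty] at hkv⟩
  simp only at hB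
  simp only [get_heights_alt, hB]
  simp
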